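-- pv_equiv track=rewrite | github.com/kazuhiko1979/edabit | 053_very_hard_Help Bobby Fix His Code.py | help_bobby
-- ===== SOURCE A (Python) =====
-- def help_bobby(size):
--
-- 	array = []
-- 	for i in range(size):
-- 		array.append([0] * size)
--
-- 	for column in range(size):
-- 		array[column][column] = 1
-- 		array[size - column - 1][column] = 1
--
-- 	return array
-- ===== SOURCE B (Python) =====
-- def help_bobby(size):
--     # Build only the top half of rows by concatenating zero runs around the two 1s,
--     # then mirror: row (size-1-i) equals row i, so the matrix is a palindrome of rows.
--     half = [[0] * i + [1] + [0] * (size - 2 * i - 2) + [1] + [0] * i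
--             for i in range(size // 2)]
--     middle = [[0] * (size // 2) + [1] + [0] * (size // 2)] if size > 0 and size % 2 == 1 else []
--     return half + middle + half[::-1]
-- ===== Notes on version B (the rewrite author's own statement) =====
-- stated objective: alternative
-- what changed: B exploits the row palindrome symmetry: it builds only the top half of rows by concatenating zero runs around the two 1s, adds the middle row for odd sizes, and mirrors the half with half[::-1], instead of A's zero-fill followed by per-column in-place diagonal writes.
import Mathlib
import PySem

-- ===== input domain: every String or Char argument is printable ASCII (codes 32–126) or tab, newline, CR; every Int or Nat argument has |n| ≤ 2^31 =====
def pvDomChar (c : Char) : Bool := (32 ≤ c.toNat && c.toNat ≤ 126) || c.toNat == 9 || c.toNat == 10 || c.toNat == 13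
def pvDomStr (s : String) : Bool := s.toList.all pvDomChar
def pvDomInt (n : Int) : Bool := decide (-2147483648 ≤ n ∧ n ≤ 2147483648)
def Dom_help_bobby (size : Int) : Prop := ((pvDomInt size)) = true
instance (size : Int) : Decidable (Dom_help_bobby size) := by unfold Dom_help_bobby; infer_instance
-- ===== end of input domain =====

-- B exploits the row symmetry of the double-diagonal matrix: it builds only the top half of
-- rows by concatenating zero runs around the two 1s and mirrors them, instead of A's
-- zero-fill-then-overwrite; same O(n^2) cost, a different construction.

-- ===== PORT A =====
-- A: zero-fill n rows, then for each column set the two diagonal cells in place.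
def help_bobby (size : Int) : List (List Int) :=
  let array := (PySem.List.pyRange 0 size 1).foldl
    (fun array _i => array ++ [List.replicate size.toNat (0 : Int)]) []
  (PySem.List.pyRange 0 size 1).foldl
    (fun array column =>
      let array := PySem.List.pySetD array column
        (PySem.List.pySetD (PySem.List.pyGetD array column []) column 1)
      PySem.List.pySetD array (size - column - 1)
        (PySem.List.pySetD (PySem.List.pyGetD array (size - column - 1) []) column 1))
    array

-- ===== PORT B =====
-- B: top half of rows by concatenation (zeros, 1, zeros, 1, zeros), middle row for odd
-- sizes, then the mirrored half via half[::-1].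
def help_bobby_alt (size : Int) : List (List Int) :=
  let half := (PySem.List.pyRange 0 (PySem.Int.floordiv size 2) 1).map (fun i =>
    List.replicate i.toNat (0 : Int) ++ [1] ++
    List.replicate (size - 2 * i - 2).toNat 0 ++ [1] ++ List.replicate i.toNat 0)
  let middle := if 0 < size ∧ PySem.Int.mod size 2 = 1 then
      [List.replicate (PySem.Int.floordiv size 2).toNat (0 : Int) ++ [1] ++
       List.replicate (PySem.Int.floordiv size 2).toNat 0]
    else []
  half ++ middle ++ (PySem.List.slice? half none none (-1)).getD []

-- ===== PRECONDITION & SPEC =====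
def Spec_help_bobby (size : Int) (out : List (List Int)) : Prop := out = help_bobby_alt size
instance (size : Int) (out : List (List Int)) : Decidable (Spec_help_bobby size out) := by unfold Spec_help_bobby; infer_instance

-- ===== CLAIM (what is proved, stated in full; the proofs are below) =====
def Claim_equal_help_bobby : Prop := ∀ (size : Int), Dom_help_bobby size → Spec_help_bobby size (help_bobby size)

-- ===== LEMMAS AND PROOFS =====

-- the common closed form both ports are reduced to
def pvRow (n i : Nat) : List Int :=
  (List.range n).map (fun j => if i = j ∨ i + j + 1 = n then 1 else 0)

def pvE (n : Nat) : List (List Int) := (List.range n).map (pvRow n)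

-- the row after the first k columns of A's second phase: diagonal 1s only in columns < k
def pvRowF (n k i : Nat) : List Int :=
  (List.range n).map (fun j => if (i = j ∨ i + j + 1 = n) ∧ j < k then 1 else 0)

lemma pv_set_map_range {α : Type} (f : Nat → α) (n k : Nat) (v : α) (hk : k < n) :
    ((List.range n).map f).set k v = (List.range n).map (fun i => if i = k then v else f i) := by
  apply List.ext_getElem
  · simp
  · intro i h1 h2
    by_cases h : i = k
    · subst h; simp
    · simp [h, Ne.symm h]

lemma pv_getD_map_range {α : Type} (f : Nat → α) (n k : Nat) (d : α) (hk : k < n) :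
    ((List.range n).map f).getD k d = f k := by
  rw [List.getD_eq_getElem _ _ (by simpa using hk)]
  simp

-- one step of A's second phase, on column k
lemma pv_step (n k : Nat) (hk : k < n) (M : List (List Int))
    (hM : M = (List.range n).map (pvRowF n k)) :
    (PySem.List.pySetD
      (PySem.List.pySetD M (k : Int)
        (PySem.List.pySetD (PySem.List.pyGetD M (k : Int) []) (k : Int) 1))
      ((n : Int) - (k : Int) - 1)
      (PySem.List.pySetD
        (PySem.List.pyGetD
          (PySem.List.pySetD M (k : Int)
            (PySem.List.pySetD (PySem.List.pyGetD M (k : Int) []) (k : Int) 1))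
          ((n : Int) - (k : Int) - 1) []) (k : Int) 1))
    = (List.range n).map (pvRowF n (k + 1)) := by
  subst hM
  have hnk : ((n : Int) - (k : Int) - 1) = ((n - 1 - k : Nat) : Int) := by omega
  have hnk' : n - 1 - k < n := by omega
  rw [hnk]
  simp only [PySem.List.pySetD_natCast, PySem.List.pyGetD_natCast]
  unfold pvRowF
  simp only [pv_getD_map_range _ _ _ _ hk, pv_set_map_range _ _ _ _ hk,
             pv_getD_map_range _ _ _ _ hnk', pv_set_map_range _ _ _ _ hnk']
  refine List.map_congr_left (fun i hi => ?_)
  simp only [List.mem_range] at hi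
  split_ifs
  all_goals
    repeat rw [pv_set_map_range _ _ _ _ hk]
  all_goals
    exact List.map_congr_left (fun j hj => by
      simp only [List.mem_range] at hj
      split_ifs <;> omega)

-- the whole second phase, by induction on the number of processed columns
lemma pv_phase2 (n : Nat) (k : Nat) (hk : k ≤ n) :
    ((List.range k).map (fun j : Nat => ((0 : Int) + (j : Int)))).foldl
      (fun array column =>
        let array := PySem.List.pySetD array column
          (PySem.List.pySetD (PySem.List.pyGetD array column []) column 1)
        PySem.List.pySetD array ((n : Int) - column - 1)
          (PySem.List.pySetD (PySem.List.pyGetD array ((n : Int) - column - 1) []) column 1))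
      ((List.range n).map (pvRowF n 0))
    = (List.range n).map (pvRowF n k) := by
  induction k with
  | zero => simp
  | succ k ih =>
    rw [List.range_succ, List.map_append, List.foldl_append, ih (by omega)]
    simp only [List.map_cons, List.map_nil, List.foldl_cons, List.foldl_nil, zero_add]
    exact pv_step n k (by omega) _ rfl

lemma pv_rowF_zero (n : Nat) : pvRowF n 0 = fun _ => List.replicate n (0 : Int) := by
  funext i
  unfold pvRowF
  apply List.ext_getElem <;> simp

lemma pv_rowF_top (n : Nat) : pvRowF n n = pvRow n := by
  funext i
  unfold pvRowF pvRow
  refine List.map_congr_left (fun j hj => ?_)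
  simp only [List.mem_range] at hj
  split_ifs <;> first | rfl | omega

-- A's port equals the closed form on every natural size
lemma pv_A_closed (n : Nat) : help_bobby (n : Int) = pvE n := by
  unfold help_bobby pvE
  rw [PySem.List.pyRange_one]
  simp only [sub_zero, Int.toNat_natCast]
  rw [PySem.List.foldl_append_singleton_eq_map
       (fun _ : Int => List.replicate n (0 : Int))
       ((List.range n).map (fun k : Nat => ((0 : Int) + (k : Int)))) []]
  rw [List.nil_append, List.map_map]
  have h0 : ((List.range n).map
      ((fun _ : Int => List.replicate n (0 : Int)) ∘ (fun k : Nat => ((0 : Int) + (k : Int)))))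
      = (List.range n).map (pvRowF n 0) := by
    rw [pv_rowF_zero]; rfl
  rw [h0, pv_phase2 n n le_rfl, pv_rowF_top]

-- a top-half row of B equals the closed-form row
lemma pv_rowB (n i : Nat) (hi : 2 * i + 2 ≤ n) :
    List.replicate i (0 : Int) ++ [1] ++
    List.replicate (n - 2 * i - 2) 0 ++ [1] ++ List.replicate i 0 = pvRow n i := by
  unfold pvRow
  apply List.ext_getElem
  · simp; omega
  · intro j h1 h2
    simp only [List.length_map, List.length_range] at h2
    simp only [List.getElem_map, List.getElem_range, List.getElem_append,
               List.length_append, List.length_replicate, List.length_singleton,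
               List.getElem_replicate, List.getElem_singleton]
    split_ifs <;> omega

-- the middle row of an odd-size matrix equals the closed-form row
lemma pv_rowMid (n : Nat) (hn : n % 2 = 1) :
    List.replicate (n / 2) (0 : Int) ++ [1] ++ List.replicate (n / 2) 0 = pvRow n (n / 2) := by
  unfold pvRow
  apply List.ext_getElem
  · simp; omega
  · intro j h1 h2
    simp only [List.length_map, List.length_range] at h2
    simp only [List.getElem_map, List.getElem_range, List.getElem_append,
               List.length_append, List.length_replicate, List.length_singleton,
               List.getElem_replicate, List.getElem_singleton]
    split_ifs <;> omega

-- rows are palindromic: row (n-1-k) = row k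
lemma pv_row_symm (n k : Nat) (hk : k < n) : pvRow n (n - 1 - k) = pvRow n k := by
  unfold pvRow
  refine List.map_congr_left (fun j hj => ?_)
  simp only [List.mem_range] at hj
  split_ifs <;> omega

-- assembling half ++ middle ++ reversed half gives the closed form (odd size)
lemma pv_mirror_odd (n : Nat) (hn : n % 2 = 1) :
    (List.range (n / 2)).map (pvRow n) ++ [pvRow n (n / 2)] ++
      ((List.range (n / 2)).map (pvRow n)).reverse = pvE n := by
  unfold pvE
  apply List.ext_getElem
  · simp; omega
  · intro i h1 h2
    simp only [List.length_map, List.length_range] at h2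
    simp only [List.getElem_map, List.getElem_range]
    rcases lt_trichotomy i (n / 2) with hi | hi | hi
    · rw [List.getElem_append_left (by simp; omega), List.getElem_append_left (by simpa using hi)]
      simp
    · subst hi
      rw [List.getElem_append_left (by simp), List.getElem_append_right (by simp)]
      simp
    · rw [List.getElem_append_right (by simp; omega), List.getElem_reverse]
      simp only [List.length_append, List.length_map, List.length_range, List.length_cons,
                 List.length_nil, List.getElem_map, List.getElem_range]
      convert pv_row_symm n i (by omega) using 2
      omega

-- assembling half ++ reversed half gives the closed form (even size)
lemma pv_mirror_even (n : Nat) (hn : n % 2 = 0) :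
    (List.range (n / 2)).map (pvRow n) ++ [] ++
      ((List.range (n / 2)).map (pvRow n)).reverse = pvE n := by
  rw [List.append_nil]
  unfold pvE
  apply List.ext_getElem
  · simp; omega
  · intro i h1 h2
    simp only [List.length_map, List.length_range] at h2
    simp only [List.getElem_map, List.getElem_range]
    rcases lt_or_ge i (n / 2) with hi | hi
    · rw [List.getElem_append_left (by simpa using hi)]
      simp
    · rw [List.getElem_append_right (by simpa using hi), List.getElem_reverse]
      simp only [List.length_map, List.length_range, List.getElem_map, List.getElem_range]
      convert pv_row_symm n i (by omega) using 2
      omega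

-- B's port equals the closed form on every natural size
lemma pv_B_closed (n : Nat) : help_bobby_alt (n : Int) = pvE n := by
  unfold help_bobby_alt
  dsimp only
  rw [PySem.List.slice?_none_none_neg_one]
  simp only [Option.getD_some]
  have hfd : PySem.Int.floordiv (n : Int) 2 = ((n / 2 : Nat) : Int) := by
    exact_mod_cast PySem.Int.floordiv_natCast n 2
  have hmd : PySem.Int.mod (n : Int) 2 = ((n % 2 : Nat) : Int) := by
    exact_mod_cast PySem.Int.mod_natCast n 2
  rw [hfd, hmd, PySem.List.pyRange_one]
  simp only [sub_zero, Int.toNat_natCast, List.map_map]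
  have hhalf : ((List.range (n / 2)).map
      ((fun i : Int =>
        List.replicate i.toNat (0 : Int) ++ [1] ++
        List.replicate ((n : Int) - 2 * i - 2).toNat 0 ++ [1] ++ List.replicate i.toNat 0) ∘
       (fun k : Nat => ((0 : Int) + (k : Int)))))
      = (List.range (n / 2)).map (pvRow n) := by
    refine List.map_congr_left (fun k hk => ?_)
    simp only [List.mem_range] at hk
    simp only [Function.comp_apply, zero_add, Int.toNat_natCast]
    rw [show ((n : Int) - 2 * (k : Int) - 2).toNat = n - 2 * k - 2 by omega]
    exact pv_rowB n k (by omega)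
  rw [hhalf]
  by_cases hpar : n % 2 = 1
  · rw [if_pos ⟨by exact_mod_cast Nat.pos_of_ne_zero (by omega), by rw [hpar]; rfl⟩]
    rw [pv_rowMid n hpar]
    exact pv_mirror_odd n hpar
  · rw [if_neg (by rintro ⟨-, hm⟩; omega)]
    exact pv_mirror_even n (by omega)

-- ===== VERDICT (by name: the statement is the Claim_ definition above) =====
theorem help_bobby_spec : Claim_equal_help_bobby := by
  intro size _
  show help_bobby size = help_bobby_alt size
  rcases le_or_gt size 0 with hs | hs
  · have hA : help_bobby size = [] := by
      unfold help_bobby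
      rw [PySem.List.pyRange_one_eq_nil hs]
      rfl
    have hfd : PySem.Int.floordiv size 2 ≤ 0 := by
      have h := (PySem.Int.floordiv_lt_iff_lt_mul (a := size) (b := 2) (q := 1) (by norm_num))
      omega
    have hB : help_bobby_alt size = [] := by
      unfold help_bobby_alt
      dsimp only
      rw [PySem.List.pyRange_one_eq_nil (by omega)]
      rw [if_neg (by rintro ⟨h0, -⟩; omega)]
      simp [PySem.List.slice?_none_none_neg_one]
    rw [hA, hB]
  · obtain ⟨n, rfl⟩ : ∃ n : Nat, size = (n : Int) := ⟨size.toNat, by omega⟩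
    rw [pv_A_closed, pv_B_closed]
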